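-- pv_equiv track=rewrite | github.com/csiiiv/dpwh-2026-hierarchy-analysis | scripts/analyze_all_levels.py | get_unique_values_by_level
-- ===== SOURCE A (Python) =====
-- from typing import Dict, List, Set, Tuple
--
-- def get_unique_values_by_level(rows: List[Dict], max_level: int = 6) -> Dict[int, Set[str]]:
--     """
--     Get all unique values for each level up to max_level.
--
--     Returns:
--         Dictionary mapping level to set of unique values
--     """
--     level_values = {}
--
--     for level in range(max_level + 1):
--         level_key = f'level_{level}'
--         values = set()
--
--         for row in rows:
--             value = row.get(level_key, '').strip()
--             if value:
--                 values.add(value)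
--
--         level_values[level] = values
--
--     return level_values
-- ===== SOURCE B (Python) =====
-- def get_unique_values_by_level(rows, max_level=6):
--     """Build an inverted index (raw key -> set of stripped non-empty values) in a
--     single pass over all rows' items, then read each level's set out of the index."""
--     index = {}
--     for row in rows:
--         for key, raw in row.items():
--             value = raw.strip()
--             if value:
--                 index.setdefault(key, set()).add(value)
--     return {lvl: index.get(f'level_{lvl}', set()) for lvl in range(max_level + 1)}
-- ===== Notes on version B (the rewrite author's own statement) =====
-- stated objective: faster
-- what changed: B builds an inverted index from raw key strings to sets of stripped values in one pass over all rows' items, then reads each level's set out of the index, instead of A's per-level rescan of the rows probing f'level_{lvl}'.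
import Mathlib
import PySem

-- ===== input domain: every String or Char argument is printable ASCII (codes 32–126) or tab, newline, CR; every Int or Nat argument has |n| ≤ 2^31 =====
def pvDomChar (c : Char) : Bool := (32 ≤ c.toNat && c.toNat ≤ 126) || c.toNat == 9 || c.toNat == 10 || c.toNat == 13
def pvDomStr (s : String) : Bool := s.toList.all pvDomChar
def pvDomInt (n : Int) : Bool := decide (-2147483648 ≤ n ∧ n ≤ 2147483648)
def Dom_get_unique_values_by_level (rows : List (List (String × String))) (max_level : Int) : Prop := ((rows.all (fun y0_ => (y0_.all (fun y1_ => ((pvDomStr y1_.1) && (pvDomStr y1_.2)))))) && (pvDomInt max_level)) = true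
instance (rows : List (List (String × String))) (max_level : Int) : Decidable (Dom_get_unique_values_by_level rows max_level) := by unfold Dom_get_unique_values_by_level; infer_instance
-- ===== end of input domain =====

-- B builds one inverted index (raw key -> set of stripped values) in a single pass over
-- all rows' items and then reads each level's set out of it, instead of A's per-level
-- rescan of the rows probing f'level_{lvl}': one pass over the data instead of one per level.

-- ===== PORT A =====
def get_unique_values_by_level (rows : List (List (String × String))) (max_level : Int) : List (Int × List String) :=
  let level_values : PySem.Dict Int (List String) :=
    (PySem.List.pyRange 0 (max_level + 1) 1).foldl
      (fun level_values level =>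
        let level_key := "level_" ++ PySem.Int.toStr level
        let values : PySem.Set String :=
          rows.foldl
            (fun values row =>
              let value := PySem.Str.strip (PySem.Dict.getD (PySem.Dict.mk row) level_key "")
              if value ≠ "" then PySem.Set.add values value else values)
            PySem.Set.empty
        level_values.insert level values)
      PySem.Dict.empty
  level_values.items

-- ===== PORT B =====
def get_unique_values_by_level_alt (rows : List (List (String × String))) (max_level : Int) : List (Int × List String) :=
  let index : PySem.Dict String (List String) :=
    rows.foldl
      (fun index row =>
        (PySem.Dict.mk row).items.foldl
          (fun index p =>
            let value := PySem.Str.strip p.2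
            if value ≠ "" then index.modify p.1 PySem.Set.empty (fun s => PySem.Set.add s value) else index)
          index)
      PySem.Dict.empty
  ((PySem.List.pyRange 0 (max_level + 1) 1).foldl
    (fun d lvl => d.insert lvl (index.getD ("level_" ++ PySem.Int.toStr lvl) PySem.Set.empty))
    PySem.Dict.empty).items

-- ===== PRECONDITION & SPEC =====
-- Pre_ excludes association lists holding a duplicate key inside one row: a Python dict
-- (A's actual row type) can never contain a duplicate key, so such lists represent no
-- Python input, and on them the first-match/overwrite choice of a lookup is accidental.
def Pre_get_unique_values_by_level (rows : List (List (String × String))) (max_level : Int) : Prop :=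
  rows.all (fun row => (row.map Prod.fst).Nodup)
instance (rows : List (List (String × String))) (max_level : Int) : Decidable (Pre_get_unique_values_by_level rows max_level) := by unfold Pre_get_unique_values_by_level; infer_instance

def pvWitness_get_unique_values_by_level : (List (List (String × String))) × Int :=
  ([[("level_0", " a "), ("level_1", "b")], [("level_0", "c")]], 2)

def Spec_get_unique_values_by_level (rows : List (List (String × String))) (max_level : Int) (out : List (Int × List String)) : Prop := out = get_unique_values_by_level_alt rows max_level
instance (rows : List (List (String × String))) (max_level : Int) (out : List (Int × List String)) : Decidable (Spec_get_unique_values_by_level rows max_level out) := by unfold Spec_get_unique_values_by_level; infer_instance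

-- ===== CLAIM (what is proved, stated in full; the proofs are below) =====
def Claim_equal_get_unique_values_by_level : Prop := ∀ (rows : List (List (String × String))) (max_level : Int), Dom_get_unique_values_by_level rows max_level → Pre_get_unique_values_by_level rows max_level → Spec_get_unique_values_by_level rows max_level (get_unique_values_by_level rows max_level)

-- ===== LEMMAS AND PROOFS =====

-- the per-row effect on one key's set of values, shared shape of both ports
def pvUpd (row : List (String × String)) (q : String) (s : PySem.Set String) : PySem.Set String :=
  let value := PySem.Str.strip (PySem.Dict.getD (PySem.Dict.mk row) q "")
  if value ≠ "" then PySem.Set.add s value else s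

-- B's inner step over one (key, raw-value) item
def pvBStep (index : PySem.Dict String (List String)) (p : String × String) : PySem.Dict String (List String) :=
  let value := PySem.Str.strip p.2
  if value ≠ "" then index.modify p.1 PySem.Set.empty (fun s => PySem.Set.add s value) else index

theorem pv_get?_mk_of_not_mem (l : List (String × String)) (q : String)
    (h : q ∉ l.map Prod.fst) : (PySem.Dict.mk l).get? q = none := by
  induction l with
  | nil => rfl
  | cons p l ih =>
    rw [show PySem.Dict.mk (p :: l) = PySem.Dict.mk ((p.1, p.2) :: l) by rfl,
      PySem.Dict.get?_mk_cons]
    have h1 : p.1 ≠ q := by intro hq; exact h (by simp [hq])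
    simp only [beq_iff_eq, h1, if_false]
    exact ih (fun hm => h (by simp at hm ⊢; exact Or.inr hm))

theorem pv_inner (l : List (String × String)) :
    (l.map Prod.fst).Nodup → ∀ (d : PySem.Dict String (List String)) (q : String),
    (l.foldl pvBStep d).getD q PySem.Set.empty = pvUpd l q (d.getD q PySem.Set.empty) := by
  induction l with
  | nil =>
    intro _ d q
    simp [pvUpd, PySem.Dict.getD_eq_get?_getD]
    rw [show (PySem.Dict.mk ([] : List (String × String))).get? q = none from rfl]
    simp [PySem.Str.strip]
    intro h
    exact absurd rfl h
  | cons p l ih =>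
    intro hnd d q
    have hnd' : (l.map Prod.fst).Nodup := (List.nodup_cons.mp (by simpa using hnd)).2
    have hnx : p.1 ∉ l.map Prod.fst := (List.nodup_cons.mp (by simpa using hnd)).1
    rw [List.foldl_cons, ih hnd']
    have hmkgetD : (PySem.Dict.mk (p :: l)).getD q "" =
        if p.1 = q then p.2 else (PySem.Dict.mk l).getD q "" := by
      rw [PySem.Dict.getD_eq_get?_getD,
        show PySem.Dict.mk (p :: l) = PySem.Dict.mk ((p.1, p.2) :: l) by rfl,
        PySem.Dict.get?_mk_cons]
      by_cases h : p.1 = q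
      · simp [h]
      · simp [h, PySem.Dict.getD_eq_get?_getD]
    by_cases hq : p.1 = q
    · -- this item is the (unique) one with key q
      have hnone : (PySem.Dict.mk l).get? q = none := pv_get?_mk_of_not_mem l q (hq ▸ hnx)
      have hlgetD : (PySem.Dict.mk l).getD q "" = "" := by
        rw [PySem.Dict.getD_eq_get?_getD, hnone]; rfl
      have hupdl : ∀ s, pvUpd l q s = s := by
        intro s; simp [pvUpd, hlgetD, PySem.Str.strip]; intro h; exact absurd rfl h
      rw [hupdl]
      show (pvBStep d p).getD q PySem.Set.empty = pvUpd (p :: l) q (d.getD q PySem.Set.empty)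
      unfold pvBStep pvUpd
      rw [hmkgetD]
      simp only [hq]
      by_cases hv : PySem.Str.strip p.2 = ""
      · simp [hv]
      · simp only [ne_eq, hv, not_false_eq_true, if_true]
        rw [PySem.Dict.getD_modify_self]
    · -- different key: the step leaves slot q untouched, the head contributes nothing
      have hstep : (pvBStep d p).getD q PySem.Set.empty = d.getD q PySem.Set.empty := by
        unfold pvBStep
        by_cases hv : PySem.Str.strip p.2 = ""
        · simp [hv]
        · simp only [ne_eq, hv, not_false_eq_true, if_true]
          rw [PySem.Dict.getD_modify, if_neg (fun h => hq h.symm)]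
      rw [hstep]
      unfold pvUpd
      rw [hmkgetD, if_neg hq]

theorem pv_outer (rows : List (List (String × String))) :
    (∀ row ∈ rows, (row.map Prod.fst).Nodup) →
    ∀ (d : PySem.Dict String (List String)) (q : String),
    (rows.foldl (fun d row => (PySem.Dict.mk row).items.foldl pvBStep d) d).getD q PySem.Set.empty
      = rows.foldl (fun s row => pvUpd row q s) (d.getD q PySem.Set.empty) := by
  induction rows with
  | nil => intro _ d q; rfl
  | cons row rows ih =>
    intro hnd d q
    rw [List.foldl_cons, List.foldl_cons,
      ih (fun r hr => hnd r (by simp [hr])) _ q]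
    congr 1
    exact pv_inner row (hnd row (by simp)) d q

theorem pv_spec (rows : List (List (String × String))) (max_level : Int)
    (hpre : ∀ row ∈ rows, (row.map Prod.fst).Nodup) :
    get_unique_values_by_level rows max_level = get_unique_values_by_level_alt rows max_level := by
  have hnd : (PySem.List.pyRange 0 (max_level + 1) 1).Nodup := PySem.List.nodup_pyRange_one _ _
  -- A side: items of a fresh-key insert loop are the mapped list
  have hA : get_unique_values_by_level rows max_level
      = (PySem.List.pyRange 0 (max_level + 1) 1).map
          (fun lvl => (lvl, rows.foldl (fun s row => pvUpd row ("level_" ++ PySem.Int.toStr lvl) s) PySem.Set.empty)) := by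
    show ((PySem.List.pyRange 0 (max_level + 1) 1).foldl
        (fun d lvl => d.insert lvl (rows.foldl (fun s row => pvUpd row ("level_" ++ PySem.Int.toStr lvl) s) PySem.Set.empty))
        PySem.Dict.empty).items = _
    rw [PySem.Dict.items_foldl_insert_fresh _ (fun a => a) _ _
      (fun a _ => PySem.Dict.contains_empty a) (by simpa using hnd)]
    simp [PySem.Dict.empty]
  -- B side
  have hB : get_unique_values_by_level_alt rows max_level
      = (PySem.List.pyRange 0 (max_level + 1) 1).map
          (fun lvl => (lvl,
            (rows.foldl (fun d row => (PySem.Dict.mk row).items.foldl pvBStep d)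
              PySem.Dict.empty).getD ("level_" ++ PySem.Int.toStr lvl) PySem.Set.empty)) := by
    show ((PySem.List.pyRange 0 (max_level + 1) 1).foldl
        (fun d lvl => d.insert lvl ((rows.foldl (fun d row => (PySem.Dict.mk row).items.foldl pvBStep d)
          PySem.Dict.empty).getD ("level_" ++ PySem.Int.toStr lvl) PySem.Set.empty))
        PySem.Dict.empty).items = _
    rw [PySem.Dict.items_foldl_insert_fresh _ (fun a => a) _ _
      (fun a _ => PySem.Dict.contains_empty a) (by simpa using hnd)]
    simp [PySem.Dict.empty]
  rw [hA, hB]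
  apply List.map_congr_left
  intro lvl _
  rw [pv_outer rows hpre PySem.Dict.empty ("level_" ++ PySem.Int.toStr lvl)]
  rfl

-- ===== VERDICT (by name: the statement is the Claim_ definition above) =====
theorem get_unique_values_by_level_spec : Claim_equal_get_unique_values_by_level := by
  intro rows max_level _ hpre
  unfold Spec_get_unique_values_by_level
  apply pv_spec
  intro row hr
  unfold Pre_get_unique_values_by_level at hpre
  simpa using (by simpa using hpre : ∀ r ∈ rows, (r.map Prod.fst).Nodup) row hr
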